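-- pv_equiv track=rewrite | github.com/LamaAlsulamy/tajlees_system | seating_algorithm.py | find_contiguous_block_in_region
-- ===== SOURCE A (Python) =====
-- def find_contiguous_block_in_region(row, block_size, left_bound, right_bound):
--     """
--     In a given row (list), find a contiguous block of empty seats (None)
--     between left_bound and right_bound (inclusive) that fits block_size people.
--     Returns the starting index if found; otherwise, returns None.
--     """
--     count = 0
--     start_index = None
--     for i in range(left_bound, right_bound + 1):
--         if row[i] is None:
--             if start_index is None:
--                 start_index = i
--             count += 1
--             if count >= block_size:
--                 return start_index
--         else:
--             count = 0
--             start_index = None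
--     return None
-- ===== SOURCE B (Python) =====
-- def find_contiguous_block_in_region(row, block_size, left_bound, right_bound):
--     i = left_bound
--     while i <= right_bound:
--         if row[i] is not None:
--             i += 1
--             continue
--         # i is an empty candidate start: verify the window ahead of it
--         j = i + 1
--         while j - i < block_size and j <= right_bound and row[j] is None:
--             j += 1
--         if j - i >= block_size:
--             return i
--         if j > right_bound:
--             return None  # the run reaches the region end and is still too short
--         i = j + 1  # skip past the blocking seat
--     return None
-- ===== Notes on version B (the rewrite author's own statement) =====
-- stated objective: alternative
-- what changed: Replaces A's single accumulate-and-reset pass carrying (count, start_index) with a skip-ahead scheme: find the next empty seat, verify the window of block_size seats after it in an inner loop, and on a blocking seat restart the outer scan just past it (no counter or start accumulator).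
-- outside the precondition, e.g. on find_contiguous_block_in_region([None, None, 1], 1, 0, 5): A returns 0, B returns 0
import Mathlib
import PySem

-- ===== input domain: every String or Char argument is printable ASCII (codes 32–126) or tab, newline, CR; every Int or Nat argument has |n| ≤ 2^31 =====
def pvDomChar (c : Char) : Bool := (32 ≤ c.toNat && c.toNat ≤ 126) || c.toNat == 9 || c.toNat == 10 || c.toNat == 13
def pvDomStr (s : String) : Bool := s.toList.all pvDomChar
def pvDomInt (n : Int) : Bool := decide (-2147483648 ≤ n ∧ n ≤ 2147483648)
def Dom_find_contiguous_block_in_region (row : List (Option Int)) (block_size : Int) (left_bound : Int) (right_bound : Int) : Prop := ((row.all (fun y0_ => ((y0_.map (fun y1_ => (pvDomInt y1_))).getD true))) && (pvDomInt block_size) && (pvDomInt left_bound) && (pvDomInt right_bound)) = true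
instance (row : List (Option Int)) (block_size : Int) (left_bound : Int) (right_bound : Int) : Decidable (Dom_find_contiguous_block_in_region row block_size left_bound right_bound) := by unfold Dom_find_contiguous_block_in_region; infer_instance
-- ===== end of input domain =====

-- B replaces the accumulate-and-reset pass with a skip-ahead scan (find candidate, verify window, restart past the blocker); same O(n) cost, different shape.

-- ===== PORT A =====
-- the for-loop of A over range(left_bound, right_bound+1) carrying (count, start_index);
-- a pyGet? of none is an IndexError (outside Pre_), the port returns none there.
def pvGoA (row : List (Option Int)) (block_size : Int) : List Int → Int → Option Int → Option Int
  | [], _, _ => none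
  | i :: rest, count, start =>
    match PySem.List.pyGet? row i with
    | none => none
    | some cell =>
      if cell.isNone then
        let start' := if start.isNone then some i else start
        if block_size ≤ count + 1 then start'
        else pvGoA row block_size rest (count + 1) start'
      else pvGoA row block_size rest 0 none

def find_contiguous_block_in_region (row : List (Option Int)) (block_size : Int) (left_bound : Int) (right_bound : Int) : Option Int :=
  pvGoA row block_size (PySem.List.pyRange left_bound (right_bound + 1) 1) 0 none

-- ===== PORT B =====
-- Source B's inner while loop: advance j while j-i < block_size, j ≤ right_bound and row[j] is None;
-- returns the final j (none = IndexError at row[j], outside Pre_).  The Nat fuel only bounds the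
-- iteration count ((rb+1-j).toNat at entry); it never changes the computed value.
def pvInnerB (row : List (Option Int)) (bs rb i : Int) : Int → Nat → Option Int
  | j, 0 => some j
  | j, fuel + 1 =>
    if j - i < bs then
      if j ≤ rb then
        match PySem.List.pyGet? row j with
        | none => none
        | some cell => if cell.isNone then pvInnerB row bs rb i (j + 1) fuel else some j
      else some j
    else some j

-- Source B's outer while loop over i (fuel = (rb+1-i).toNat at entry, again only a bound)
def pvOuterB (row : List (Option Int)) (bs rb : Int) : Int → Nat → Option Int
  | _, 0 => none
  | i, fuel + 1 =>
    if i ≤ rb then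
      match PySem.List.pyGet? row i with
      | none => none
      | some cell =>
        if cell.isNone then
          match pvInnerB row bs rb i (i + 1) ((rb - i).toNat) with
          | none => none
          | some j =>
            if bs ≤ j - i then some i
            else if rb < j then none
            else pvOuterB row bs rb (j + 1) fuel
        else pvOuterB row bs rb (i + 1) fuel
    else none

def find_contiguous_block_in_region_alt (row : List (Option Int)) (block_size : Int) (left_bound : Int) (right_bound : Int) : Option Int :=
  pvOuterB row block_size right_bound left_bound ((right_bound + 1 - left_bound).toNat)

-- ===== PRECONDITION & SPEC =====
-- Pre_ requires the scanned region to be empty or to lie inside Python's index bounds: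
-- outside it A raises IndexError, except when it early-returns before touching the
-- out-of-range index — there B returns A's exact value too (see the cite), but that set
-- is not closed-form, so Pre_ conservatively requires the whole region to be in range.
def Pre_find_contiguous_block_in_region (row : List (Option Int)) (block_size : Int) (left_bound : Int) (right_bound : Int) : Prop :=
  right_bound < left_bound ∨ (-(row.length : Int) ≤ left_bound ∧ right_bound < (row.length : Int))
instance (row : List (Option Int)) (block_size : Int) (left_bound : Int) (right_bound : Int) : Decidable (Pre_find_contiguous_block_in_region row block_size left_bound right_bound) := by unfold Pre_find_contiguous_block_in_region; infer_instance

def pvWitness_find_contiguous_block_in_region : List (Option Int) × Int × Int × Int := ([some 1, none, none, some 2], 2, 0, 3)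

def Spec_find_contiguous_block_in_region (row : List (Option Int)) (block_size : Int) (left_bound : Int) (right_bound : Int) (out : Option Int) : Prop := out = find_contiguous_block_in_region_alt row block_size left_bound right_bound
instance (row : List (Option Int)) (block_size : Int) (left_bound : Int) (right_bound : Int) (out : Option Int) : Decidable (Spec_find_contiguous_block_in_region row block_size left_bound right_bound out) := by unfold Spec_find_contiguous_block_in_region; infer_instance

-- ===== CLAIM =====
def Claim_equal_find_contiguous_block_in_region : Prop := ∀ (row : List (Option Int)) (block_size : Int) (left_bound : Int) (right_bound : Int), Dom_find_contiguous_block_in_region row block_size left_bound right_bound → Pre_find_contiguous_block_in_region row block_size left_bound right_bound → Spec_find_contiguous_block_in_region row block_size left_bound right_bound (find_contiguous_block_in_region row block_size left_bound right_bound)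

-- ===== LEMMAS AND PROOFS =====

theorem pvGet_some (row : List (Option Int)) (k : Int)
    (h1 : -(row.length : Int) ≤ k) (h2 : k < (row.length : Int)) :
    ∃ c, PySem.List.pyGet? row k = some c := by
  cases hc : PySem.List.pyGet? row k with
  | none =>
    rw [PySem.List.pyGet?_eq_none_iff] at hc
    exact absurd (by unfold PySem.Raise.InRange; omega) hc
  | some c => exact ⟨c, rfl⟩

-- past the region the outer loop returns none at any fuel
theorem pvOuterB_past (row : List (Option Int)) (bs rb : Int) :
    ∀ (f : Nat) (k : Int), rb < k → pvOuterB row bs rb k f = none := by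
  intro f k hk
  cases f with
  | zero => rfl
  | succ f => rw [pvOuterB, if_neg (by omega)]

-- A's scan in the middle of a run of empties (count = j - i, start = some i) equals
-- B's inner-loop continuation followed by the outer loop's decision on its result.
theorem pvRunB (row : List (Option Int)) (bs lb rb : Int)
    (hb : -(row.length : Int) ≤ lb) (hr : rb < (row.length : Int))
    (i : Int) (hi : lb ≤ i) (F : Nat)
    (HM : ∀ k, i < k → pvGoA row bs (PySem.List.pyRange k (rb + 1) 1) 0 none = pvOuterB row bs rb k F) :
    ∀ (m : Nat) (j : Int), i < j → j - i < bs → (rb + 1 - j).toNat ≤ m →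
      pvGoA row bs (PySem.List.pyRange j (rb + 1) 1) (j - i) (some i) =
        (match pvInnerB row bs rb i j ((rb + 1 - j).toNat) with
         | none => none
         | some j' => if bs ≤ j' - i then some i else if rb < j' then none
                      else pvOuterB row bs rb (j' + 1) F) := by
  intro m
  induction m with
  | zero =>
    intro j hij hcnt hm
    have hf : (rb + 1 - j).toNat = 0 := by omega
    rw [PySem.List.pyRange_one_eq_nil (by omega), hf]
    simp only [pvGoA, pvInnerB]
    rw [if_neg (by omega), if_pos (by omega)]
  | succ m ih =>
    intro j hij hcnt hm
    by_cases hjr : j ≤ rb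
    · obtain ⟨cell, hc⟩ := pvGet_some row j (by omega) (by omega)
      have hf : (rb + 1 - j).toNat = (rb + 1 - (j + 1)).toNat + 1 := by omega
      rw [PySem.List.pyRange_one_cons (by omega), hf]
      by_cases hcell : cell.isNone = true
      · by_cases hdone : bs ≤ j - i + 1
        · have hβ : pvInnerB row bs rb i j ((rb + 1 - (j + 1)).toNat + 1) = some (j + 1) := by
            rw [pvInnerB, if_pos hcnt, if_pos hjr]
            simp only [hc, hcell, if_true]
            cases hf2 : (rb + 1 - (j + 1)).toNat with
            | zero => rfl
            | succ k => rw [pvInnerB, if_neg (show ¬ j + 1 - i < bs by omega)]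
          simp only [pvGoA, hc, hcell, if_true, hβ, Option.isNone_some, Bool.false_eq_true,
            if_false]
          rw [if_pos hdone, if_pos (by omega)]
        · have hβ : pvInnerB row bs rb i j ((rb + 1 - (j + 1)).toNat + 1) =
              pvInnerB row bs rb i (j + 1) ((rb + 1 - (j + 1)).toNat) := by
            rw [pvInnerB, if_pos hcnt, if_pos hjr]
            simp only [hc, hcell, if_true]
          simp only [pvGoA, hc, hcell, if_true, Option.isNone_some, Bool.false_eq_true, if_false]
          rw [if_neg hdone, hβ]
          have e : j - i + 1 = j + 1 - i := by ring
          rw [e]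
          exact ih (j + 1) (by omega) (by omega) (by omega)
      · have hβ : pvInnerB row bs rb i j ((rb + 1 - (j + 1)).toNat + 1) = some j := by
          rw [pvInnerB, if_pos hcnt, if_pos hjr]
          simp only [hc]
          rw [if_neg hcell]
        simp only [pvGoA, hc, hβ]
        rw [if_neg hcell, if_neg (by omega), if_neg (by omega)]
        exact HM (j + 1) (by omega)
    · have hf : (rb + 1 - j).toNat = 0 := by omega
      rw [PySem.List.pyRange_one_eq_nil (by omega), hf]
      simp only [pvGoA, pvInnerB]
      rw [if_neg (by omega), if_pos (by omega)]

-- the main correspondence: A's scan from i (fresh state) equals B's outer loop at i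
theorem pvMainB (row : List (Option Int)) (bs lb rb : Int)
    (hb : -(row.length : Int) ≤ lb) (hr : rb < (row.length : Int)) :
    ∀ (n : Nat) (i : Int), lb ≤ i → (rb + 1 - i).toNat ≤ n →
      pvGoA row bs (PySem.List.pyRange i (rb + 1) 1) 0 none = pvOuterB row bs rb i n := by
  intro n
  induction n with
  | zero =>
    intro i hi hn
    rw [PySem.List.pyRange_one_eq_nil (by omega)]
    simp [pvGoA, pvOuterB]
  | succ n ih =>
    intro i hi hn
    by_cases hir : i ≤ rb
    · obtain ⟨cell, hc⟩ := pvGet_some row i (by omega) (by omega)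
      have HM : ∀ k, i < k → pvGoA row bs (PySem.List.pyRange k (rb + 1) 1) 0 none = pvOuterB row bs rb k n := by
        intro k hk
        by_cases hkr : k ≤ rb
        · exact ih k (by omega) (by omega)
        · rw [PySem.List.pyRange_one_eq_nil (by omega), pvOuterB_past row bs rb n k (by omega)]
          simp [pvGoA]
      rw [PySem.List.pyRange_one_cons (by omega), pvOuterB, if_pos hir]
      by_cases hcell : cell.isNone = true
      · simp only [pvGoA, hc, hcell, if_true, Option.isNone_none]
        by_cases hdone : bs ≤ (0 : Int) + 1
        · have hβ : pvInnerB row bs rb i (i + 1) ((rb - i).toNat) = some (i + 1) := by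
            cases hf2 : (rb - i).toNat with
            | zero => rfl
            | succ k => rw [pvInnerB, if_neg (show ¬ i + 1 - i < bs by omega)]
          rw [if_pos hdone]
          simp only [hβ]
          rw [if_pos (by omega)]
        · rw [if_neg hdone]
          have e : (0 : Int) + 1 = i + 1 - i := by ring
          rw [e]
          have hfe : (rb - i).toNat = (rb + 1 - (i + 1)).toNat := by omega
          rw [hfe]
          exact pvRunB row bs lb rb hb hr i hi n HM ((rb + 1 - (i + 1)).toNat) (i + 1)
            (by omega) (by omega) le_rfl
      · simp only [pvGoA, hc]
        rw [if_neg hcell, if_neg hcell]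
        exact HM (i + 1) (by omega)
    · rw [PySem.List.pyRange_one_eq_nil (by omega), pvOuterB, if_neg (by omega)]
      simp [pvGoA]

-- ===== VERDICT (by name: the statement is the Claim_ definition above) =====
theorem find_contiguous_block_in_region_spec : Claim_equal_find_contiguous_block_in_region := by
  intro row bs lb rb _ hpre
  unfold Spec_find_contiguous_block_in_region find_contiguous_block_in_region find_contiguous_block_in_region_alt
  rcases hpre with h | ⟨h1, h2⟩
  · have hf : (rb + 1 - lb).toNat = 0 := by omega
    rw [PySem.List.pyRange_one_eq_nil (by omega), hf]
    simp [pvGoA, pvOuterB]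
  · exact pvMainB row bs lb rb h1 h2 ((rb + 1 - lb).toNat) lb le_rfl le_rfl
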